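-- pv_equiv track=rewrite | github.com/sc420/funghi-den-adventure | allocation_calculator/calc.py | is_reduce_requirement_met
-- ===== SOURCE A (Python) =====
-- def is_reduce_requirement_met(requirement, augmented_funghis):
--     if 'reduce_stats' not in requirement:
--         return True
--     req_reduce_stats = requirement['reduce_stats']
--     # Check each reduce stats
--     for stat_name, reduce_target in req_reduce_stats.items():
--         reduced_sum = 0
--         # Calculate the reduced value from all funghis
--         for funghi in augmented_funghis:
--             funghi_stats = funghi['stats']
--             if stat_name in funghi_stats:
--                 reduced_sum += funghi_stats[stat_name]
--         # Check whether the reduced sum passes the requirement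
--         if reduced_sum < reduce_target:
--             return False
--     # All funghis have passed the reduce targets, the requirement is met
--     return True
-- ===== SOURCE B (Python) =====
-- def is_reduce_requirement_met(requirement, augmented_funghis):
--     if 'reduce_stats' not in requirement:
--         return True
--     totals = {}
--     for funghi in augmented_funghis:
--         for stat_name, value in funghi.get('stats', {}).items():
--             totals[stat_name] = totals.get(stat_name, 0) + value
--     return all(totals.get(stat_name, 0) >= target
--                for stat_name, target in requirement['reduce_stats'].items())
-- ===== Notes on version B (the rewrite author's own statement) =====
-- stated objective: alternative
-- what changed: B aggregates all funghi stats into a totals dict in a single pass and then checks each reduce target against that table, instead of re-scanning every funghi for every required stat.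
import Mathlib
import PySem

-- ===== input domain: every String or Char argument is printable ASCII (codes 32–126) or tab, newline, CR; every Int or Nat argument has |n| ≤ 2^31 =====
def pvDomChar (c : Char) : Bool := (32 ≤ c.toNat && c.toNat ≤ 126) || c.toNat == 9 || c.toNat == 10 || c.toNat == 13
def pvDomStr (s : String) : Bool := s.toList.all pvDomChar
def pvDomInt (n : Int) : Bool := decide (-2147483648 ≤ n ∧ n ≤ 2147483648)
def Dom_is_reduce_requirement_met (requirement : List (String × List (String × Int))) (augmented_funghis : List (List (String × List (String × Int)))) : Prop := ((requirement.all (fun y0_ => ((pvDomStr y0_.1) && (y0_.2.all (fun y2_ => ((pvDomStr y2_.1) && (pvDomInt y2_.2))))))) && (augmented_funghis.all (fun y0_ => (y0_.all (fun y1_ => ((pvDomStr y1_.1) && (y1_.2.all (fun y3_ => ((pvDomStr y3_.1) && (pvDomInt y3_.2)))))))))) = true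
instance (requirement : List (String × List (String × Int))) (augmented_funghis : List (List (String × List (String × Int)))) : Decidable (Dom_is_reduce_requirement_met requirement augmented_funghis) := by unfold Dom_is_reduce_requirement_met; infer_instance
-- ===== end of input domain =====

-- B replaces A's per-stat rescans of all funghis by one aggregation pass into a totals dict
-- plus one comparison pass over the targets. Where Python A raises KeyError
-- (funghi without 'stats'; excluded by Pre_) the port of A defaults the lookup to [].

-- ===== PORT A =====
-- inner loop of A: sum stat_name over all funghis ('funghi['stats']' defaulted to [] outside Pre_)
def pvA_sum (stat_name : String) (augmented_funghis : List (List (String × List (String × Int)))) : Int :=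
  augmented_funghis.foldl (fun reduced_sum funghi =>
    let funghi_stats := PySem.Dict.ofList ((PySem.Dict.ofList funghi).getD "stats" [])
    match funghi_stats.get? stat_name with
    | some v => reduced_sum + v
    | none => reduced_sum) 0

-- outer loop of A over req_reduce_stats.items(), with the early 'return False'
def pvA_loop (items : List (String × Int)) (augmented_funghis : List (List (String × List (String × Int)))) : Bool :=
  match items with
  | [] => true
  | (stat_name, reduce_target) :: rest =>
    if pvA_sum stat_name augmented_funghis < reduce_target then false
    else pvA_loop rest augmented_funghis

def is_reduce_requirement_met (requirement : List (String × List (String × Int))) (augmented_funghis : List (List (String × List (String × Int)))) : Bool :=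
  match (PySem.Dict.ofList requirement).get? "reduce_stats" with
  | none => true
  | some req_reduce_stats => pvA_loop (PySem.Dict.ofList req_reduce_stats).items augmented_funghis

-- ===== PORT B =====
-- B's aggregation pass: totals[stat] = totals.get(stat, 0) + value over all funghi stats
def pvB_totals (augmented_funghis : List (List (String × List (String × Int)))) : PySem.Dict String Int :=
  augmented_funghis.foldl (fun totals funghi =>
    ((PySem.Dict.ofList ((PySem.Dict.ofList funghi).getD "stats" [])).items).foldl
      (fun totals p => totals.insert p.1 (totals.getD p.1 0 + p.2)) totals)
    PySem.Dict.empty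

def is_reduce_requirement_met_alt (requirement : List (String × List (String × Int))) (augmented_funghis : List (List (String × List (String × Int)))) : Bool :=
  match (PySem.Dict.ofList requirement).get? "reduce_stats" with
  | none => true
  | some req_reduce_stats =>
    let totals := pvB_totals augmented_funghis
    (PySem.Dict.ofList req_reduce_stats).items.all (fun p => totals.getD p.1 0 ≥ p.2)

-- ===== PRECONDITION & SPEC =====
-- Pre_ excludes exactly the inputs where Python A raises KeyError (a nonempty 'reduce_stats'
-- requirement together with some funghi that has no 'stats' key); Python B returns a boolean there.
def Pre_is_reduce_requirement_met (requirement : List (String × List (String × Int))) (augmented_funghis : List (List (String × List (String × Int)))) : Prop :=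
  ((PySem.Dict.ofList requirement).getD "reduce_stats" [] = []) ∨
  (∀ funghi ∈ augmented_funghis, (PySem.Dict.ofList funghi).contains "stats" = true)
instance (requirement : List (String × List (String × Int))) (augmented_funghis : List (List (String × List (String × Int)))) : Decidable (Pre_is_reduce_requirement_met requirement augmented_funghis) := by unfold Pre_is_reduce_requirement_met; infer_instance

def pvWitness_is_reduce_requirement_met : (List (String × List (String × Int))) × (List (List (String × List (String × Int)))) :=
  ([("reduce_stats", [("a", 1)])], [[("stats", [("a", 2)])]])

def Spec_is_reduce_requirement_met (requirement : List (String × List (String × Int))) (augmented_funghis : List (List (String × List (String × Int)))) (out : Bool) : Prop := out = is_reduce_requirement_met_alt requirement augmented_funghis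
instance (requirement : List (String × List (String × Int))) (augmented_funghis : List (List (String × List (String × Int)))) (out : Bool) : Decidable (Spec_is_reduce_requirement_met requirement augmented_funghis out) := by unfold Spec_is_reduce_requirement_met; infer_instance

-- ===== CLAIM (what is proved, stated in full; the proofs are below) =====
def Claim_equal_is_reduce_requirement_met : Prop := ∀ (requirement : List (String × List (String × Int))) (augmented_funghis : List (List (String × List (String × Int)))), Dom_is_reduce_requirement_met requirement augmented_funghis → Pre_is_reduce_requirement_met requirement augmented_funghis → Spec_is_reduce_requirement_met requirement augmented_funghis (is_reduce_requirement_met requirement augmented_funghis)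

-- ===== LEMMAS AND PROOFS =====

-- a key occurring once: filtering an assoc list with nodup keys for a present key gives the one pair
lemma pv_filter_key_of_nodup {α : Type} (s : String) (v : α) :
    ∀ (l : List (String × α)), (l.map Prod.fst).Nodup → (s, v) ∈ l →
      l.filter (fun p => p.1 == s) = [(s, v)] := by
  intro l
  induction l with
  | nil => intro _ h; cases h
  | cons hd tl ih =>
    intro hnd hmem
    simp only [List.map_cons, List.nodup_cons] at hnd
    rcases List.mem_cons.mp hmem with h | h
    · subst h
      simp only [List.filter_cons, BEq.rfl, if_pos]
      have : tl.filter (fun p => p.1 == s) = [] := by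
        refine List.filter_eq_nil_iff.mpr ?_
        intro p hp hps
        have : p.1 = s := by simpa using hps
        exact hnd.1 (List.mem_map.mpr ⟨p, hp, this⟩)
      simp [this]
    · have hne : hd.1 ≠ s := by
        intro he
        exact hnd.1 (he ▸ (List.mem_map.mpr ⟨(s, v), h, rfl⟩))
      simp only [List.filter_cons]
      rw [if_neg (by simpa using hne)]
      exact ih hnd.2 h

-- filtered sum over a dict's items with nodup keys = getD with default 0
lemma pv_sumFor_eq_getD (s : String) (d : PySem.Dict String Int) (h : d.keys.Nodup) :
    ((d.items.filter (fun p => p.1 == s)).map Prod.snd).sum = d.getD s 0 := by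
  have hkeys : (d.items.map Prod.fst).Nodup := by
    simpa [PySem.Dict.keys] using h
  cases hg : d.get? s with
  | none =>
    rw [PySem.Dict.getD_of_get?_eq_none _ _ hg]
    have hnm : s ∉ d.keys := (PySem.Dict.get?_eq_none_iff_not_mem_keys _ _).mp hg
    have : d.items.filter (fun p => p.1 == s) = [] := by
      refine List.filter_eq_nil_iff.mpr ?_
      intro p hp hps
      exact hnm (by
        have : p.1 = s := by simpa using hps
        exact this ▸ PySem.Dict.mem_keys_of_mem_items _ hp)
    simp [this]
  | some v =>
    rw [PySem.Dict.getD_of_get?_eq_some _ _ hg]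
    have hmem : (s, v) ∈ d.items := PySem.Dict.mem_items_of_get?_eq_some _ hg
    rw [pv_filter_key_of_nodup s v d.items hkeys hmem]
    simp

-- one aggregation step: the insert-based fold adds the filtered sum of its list
lemma pv_foldl_insert_getD (s : String) :
    ∀ (l : List (String × Int)) (d : PySem.Dict String Int),
      (l.foldl (fun t p => t.insert p.1 (t.getD p.1 0 + p.2)) d).getD s 0
        = d.getD s 0 + ((l.filter (fun p => p.1 == s)).map Prod.snd).sum := by
  intro l
  induction l with
  | nil => intro d; simp
  | cons hd tl ih =>
    intro d
    simp only [List.foldl_cons, ih, List.filter_cons]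
    by_cases h : hd.1 = s
    · rw [if_pos (by simpa using h)]
      rw [PySem.Dict.getD_insert]
      simp [h.symm]
      ring
    · rw [if_neg (by simpa using h)]
      rw [PySem.Dict.getD_insert]
      rw [if_neg (fun he => h he.symm)]

-- B's totals at s = the sum over funghis of each funghi's own s-value
lemma pv_totals_getD (s : String) (augmented_funghis : List (List (String × List (String × Int)))) :
    (pvB_totals augmented_funghis).getD s 0
      = (augmented_funghis.map (fun f =>
          (PySem.Dict.ofList ((PySem.Dict.ofList f).getD "stats" [])).getD s 0)).sum := by
  unfold pvB_totals
  suffices h : ∀ (fs : List (List (String × List (String × Int)))) (d : PySem.Dict String Int),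
      (fs.foldl (fun totals funghi =>
        ((PySem.Dict.ofList ((PySem.Dict.ofList funghi).getD "stats" [])).items).foldl
          (fun totals p => totals.insert p.1 (totals.getD p.1 0 + p.2)) totals) d).getD s 0
        = d.getD s 0 + (fs.map (fun f =>
            (PySem.Dict.ofList ((PySem.Dict.ofList f).getD "stats" [])).getD s 0)).sum by
    simpa using h augmented_funghis PySem.Dict.empty
  intro fs
  induction fs with
  | nil => intro d; simp
  | cons f tl ih =>
    intro d
    simp only [List.foldl_cons, ih, List.map_cons, List.sum_cons]
    rw [pv_foldl_insert_getD]
    rw [pv_sumFor_eq_getD s _ (PySem.Dict.nodup_keys_ofList _)]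
    ring

-- A's per-stat rescan computes the same sum
lemma pv_sum_eq_totals (s : String) (augmented_funghis : List (List (String × List (String × Int)))) :
    pvA_sum s augmented_funghis = (pvB_totals augmented_funghis).getD s 0 := by
  rw [pv_totals_getD]
  unfold pvA_sum
  suffices h : ∀ (fs : List (List (String × List (String × Int)))) (a : Int),
      fs.foldl (fun reduced_sum funghi =>
        match (PySem.Dict.ofList ((PySem.Dict.ofList funghi).getD "stats" [])).get? s with
        | some v => reduced_sum + v
        | none => reduced_sum) a
      = a + (fs.map (fun f =>
          (PySem.Dict.ofList ((PySem.Dict.ofList f).getD "stats" [])).getD s 0)).sum by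
    simpa using h augmented_funghis 0
  intro fs
  induction fs with
  | nil => intro a; simp
  | cons f tl ih =>
    intro a
    simp only [List.foldl_cons, ih, List.map_cons, List.sum_cons]
    cases hg : (PySem.Dict.ofList ((PySem.Dict.ofList f).getD "stats" [])).get? s with
    | none =>
      rw [PySem.Dict.getD_of_get?_eq_none _ _ hg]; ring
    | some v =>
      rw [PySem.Dict.getD_of_get?_eq_some _ _ hg]; ring

-- A's early-return loop = B's all-pass over the same items
lemma pv_loop_eq (augmented_funghis : List (List (String × List (String × Int)))) :
    ∀ (items : List (String × Int)),
      pvA_loop items augmented_funghis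
        = items.all (fun p => (pvB_totals augmented_funghis).getD p.1 0 ≥ p.2) := by
  intro items
  induction items with
  | nil => rfl
  | cons hd tl ih =>
    obtain ⟨n, t⟩ := hd
    simp only [pvA_loop, List.all_cons, ih, pv_sum_eq_totals]
    by_cases h : (pvB_totals augmented_funghis).getD n 0 < t
    · simp [h, not_le.mpr h]
    · simp [h, not_lt.mp h]

-- ===== VERDICT (by name: the statement is the Claim_ definition above) =====
theorem is_reduce_requirement_met_spec : Claim_equal_is_reduce_requirement_met := by
  intro requirement augmented_funghis _ _
  unfold Spec_is_reduce_requirement_met is_reduce_requirement_met is_reduce_requirement_met_alt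
  cases (PySem.Dict.ofList requirement).get? "reduce_stats" with
  | none => rfl
  | some rrs => exact pv_loop_eq augmented_funghis _
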